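-- pv_equiv track=rewrite | github.com/miliar/Code_Jam_Webscraper | Solutions_in_python/Problem_157/gcj0315.py | buscar_k
-- ===== SOURCE A (Python) =====
-- op = {'11':'1','1i':'i','1j':'j','1k':'k','i1':'i','ii':'-1','ij':'k','ik':'-j','j1':'j','ji':'-k','jj':'-1','jk':'i','k1':'k','ki':'j','kj':'-i','kk':'-1',
--       '-11':'-1','-1i':'-i','-1j':'-j','-1k':'-k','-i1':'-i','-ii':'1','-ij':'-k','-ik':'j','-j1':'-j','-ji':'k','-jj':'1','-jk':'-i','-k1':'-k','-ki':'-j','-kj':'i','-kk':'1',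
--       '1-1':'-1','1-i':'-i','1-j':'-j','1-k':'-k','i-1':'-i','i-i':'1','i-j':'-k','i-k':'j','j-1':'-j','j-i':'k','j-j':'1','j-k':'-i','k-1':'-k','k-i':'-j','k-j':'i','k-k':'1'}
--
-- def buscar_k(palabra):
--     if len(palabra) == 1 and palabra == 'k':
--         return True
--     else:
--         l1 = palabra[0]
--         for y in range(1, len(palabra)):
--             l1 = op[l1+palabra[y]]
--         if l1 == 'k':
--             return True
--         else:
--             return False
-- ===== SOURCE B (Python) =====
-- qmap = {'1': (1, 0, 0, 0), 'i': (0, 1, 0, 0), 'j': (0, 0, 1, 0), 'k': (0, 0, 0, 1)}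
--
--
-- def hprod(p, q):
--     a, b, c, d = p
--     e, f, g, h = q
--     return (a * e - b * f - c * g - d * h,
--             a * f + b * e + c * h - d * g,
--             a * g - b * h + c * e + d * f,
--             a * h + b * g - c * f + d * e)
--
--
-- def qprod(s):
--     # divide and conquer: product of a nonempty symbol string, splitting in halves
--     if len(s) == 1:
--         return qmap[s]
--     m = len(s) // 2
--     return hprod(qprod(s[:m]), qprod(s[m:]))
--
--
-- def buscar_k(palabra):
--     if len(palabra) == 1:
--         return palabra == 'k'
--     return qprod(palabra) == (0, 0, 0, 1)
-- ===== Notes on version B (the rewrite author's own statement) =====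
-- stated objective: alternative
-- what changed: Replaces A's linear left-to-right scan through a 48-entry symbolic string lookup table by a balanced divide-and-conquer product: the string is split recursively in halves and the two sub-products are combined with the integer Hamilton product formula, relying on associativity of quaternion multiplication; the result is compared to (0,0,0,1).
import Mathlib
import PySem

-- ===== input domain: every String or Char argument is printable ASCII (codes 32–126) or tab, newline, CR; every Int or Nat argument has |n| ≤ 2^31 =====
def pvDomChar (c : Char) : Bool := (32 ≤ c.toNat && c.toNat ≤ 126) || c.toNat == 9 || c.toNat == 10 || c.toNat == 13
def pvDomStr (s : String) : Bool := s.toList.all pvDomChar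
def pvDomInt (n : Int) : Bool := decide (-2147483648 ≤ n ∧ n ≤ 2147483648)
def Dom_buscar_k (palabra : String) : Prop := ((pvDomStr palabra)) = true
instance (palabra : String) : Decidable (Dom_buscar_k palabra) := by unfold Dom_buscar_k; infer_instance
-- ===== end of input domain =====

-- B replaces A's linear scan through a 48-entry symbolic lookup table by a balanced
-- divide-and-conquer integer quaternion product (alternative algorithm, same O(n) cost).

-- ===== PORT A =====
-- Python strings are modelled as List Char ('1' ↦ ['1'], '-i' ↦ ['-','i']): exact for this ASCII table.
def opA : PySem.Dict (List Char) (List Char) := PySem.Dict.ofList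
  [ (['1','1'],['1']), (['1','i'],['i']), (['1','j'],['j']), (['1','k'],['k'])
  , (['i','1'],['i']), (['i','i'],['-','1']), (['i','j'],['k']), (['i','k'],['-','j'])
  , (['j','1'],['j']), (['j','i'],['-','k']), (['j','j'],['-','1']), (['j','k'],['i'])
  , (['k','1'],['k']), (['k','i'],['j']), (['k','j'],['-','i']), (['k','k'],['-','1'])
  , (['-','1','1'],['-','1']), (['-','1','i'],['-','i']), (['-','1','j'],['-','j']), (['-','1','k'],['-','k'])
  , (['-','i','1'],['-','i']), (['-','i','i'],['1']), (['-','i','j'],['-','k']), (['-','i','k'],['j'])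
  , (['-','j','1'],['-','j']), (['-','j','i'],['k']), (['-','j','j'],['1']), (['-','j','k'],['-','i'])
  , (['-','k','1'],['-','k']), (['-','k','i'],['-','j']), (['-','k','j'],['i']), (['-','k','k'],['1'])
  , (['1','-','1'],['-','1']), (['1','-','i'],['-','i']), (['1','-','j'],['-','j']), (['1','-','k'],['-','k'])
  , (['i','-','1'],['-','i']), (['i','-','i'],['1']), (['i','-','j'],['-','k']), (['i','-','k'],['j'])
  , (['j','-','1'],['-','j']), (['j','-','i'],['k']), (['j','-','j'],['1']), (['j','-','k'],['-','i'])
  , (['k','-','1'],['-','k']), (['k','-','i'],['-','j']), (['k','-','j'],['i']), (['k','-','k'],['1']) ]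

-- op[key]: KeyError (= none) is excluded by Pre_, so .getD [] is never reached on admitted inputs.
def buscar_k (palabra : String) : Bool :=
  let cs := palabra.toList
  if cs.length == 1 && cs == ['k'] then
    true
  else
    -- l1 = palabra[0]; IndexError on the empty string is excluded by Pre_.
    let l1 : List Char := [(PySem.List.pyGetD cs 0 ' ')]
    let l1 := (PySem.List.pyRange 1 cs.length 1).foldl
      (fun l1 y => (opA.get? (l1 ++ [PySem.List.pyGetD cs y ' '])).getD []) l1
    if l1 == ['k'] then true else false

-- ===== PORT B =====
def qmapB : PySem.Dict Char (Int × Int × Int × Int) := PySem.Dict.ofList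
  [ ('1', (1, 0, 0, 0)), ('i', (0, 1, 0, 0)), ('j', (0, 0, 1, 0)), ('k', (0, 0, 0, 1)) ]

-- qmap[c]: KeyError (= none) is excluded by Pre_, so .getD 0 is never reached on admitted inputs.
def qgetB (c : Char) : Int × Int × Int × Int := (qmapB.get? c).getD (0, 0, 0, 0)

def hprodB : Int × Int × Int × Int → Int × Int × Int × Int → Int × Int × Int × Int
  | (a, b, c, d), (e, f, g, h) =>
    (a * e - b * f - c * g - d * h,
     a * f + b * e + c * h - d * g,
     a * g - b * h + c * e + d * f,
     a * h + b * g - c * f + d * e)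

-- qprod: s[:m] / s[m:] with 0 ≤ m ≤ len are exactly List.take/List.drop.
-- The fuel argument (= initial length) and the [] branch are totality guards only:
-- each recursive call halves a list of length ≥ 2, so fuel ≥ length - 1 never runs out,
-- and buscar_k_alt never calls qprodB on [].
def qprodAux : Nat → List Char → Int × Int × Int × Int
  | _, [] => (1, 0, 0, 0)
  | _, [c] => qgetB c
  | 0, _ :: _ :: _ => (1, 0, 0, 0)
  | n + 1, cs =>
    let m := cs.length / 2
    hprodB (qprodAux n (cs.take m)) (qprodAux n (cs.drop m))

def qprodB (cs : List Char) : Int × Int × Int × Int := qprodAux cs.length cs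

def buscar_k_alt (palabra : String) : Bool :=
  let cs := palabra.toList
  if cs.length == 1 then
    cs == ['k']
  else
    qprodB cs == ((0 : Int), (0 : Int), (0 : Int), (1 : Int))

-- ===== PRECONDITION & SPEC =====
-- Pre_ excludes exactly the inputs on which A raises: the empty string (IndexError on palabra[0])
-- and strings of length ≥ 2 containing a character other than the four quaternion symbols (KeyError in the op lookup).
def Pre_buscar_k (palabra : String) : Prop :=
  palabra.toList ≠ [] ∧
  (palabra.toList.length = 1 ∨ ∀ c ∈ palabra.toList, c ∈ ['1', 'i', 'j', 'k'])
instance (palabra : String) : Decidable (Pre_buscar_k palabra) := by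
  unfold Pre_buscar_k; infer_instance
def pvWitness_buscar_k : String := "k"
def Spec_buscar_k (palabra : String) (out : Bool) : Prop := out = buscar_k_alt palabra
instance (palabra : String) (out : Bool) : Decidable (Spec_buscar_k palabra out) := by
  unfold Spec_buscar_k; infer_instance

-- ===== CLAIM (what is proved, stated in full; the proofs are below) =====
def Claim_equal_buscar_k : Prop :=
  ∀ (palabra : String), Dom_buscar_k palabra → Pre_buscar_k palabra →
    Spec_buscar_k palabra (buscar_k palabra)

-- ===== LEMMAS AND PROOFS =====

-- The eight symbolic states A's loop can be in, and their quaternion values.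
def pvStates : List (List Char) :=
  [['1'], ['i'], ['j'], ['k'], ['-','1'], ['-','i'], ['-','j'], ['-','k']]

def pvPhi : List Char → Int × Int × Int × Int
  | ['1'] => (1, 0, 0, 0)
  | ['i'] => (0, 1, 0, 0)
  | ['j'] => (0, 0, 1, 0)
  | ['k'] => (0, 0, 0, 1)
  | ['-','1'] => (-1, 0, 0, 0)
  | ['-','i'] => (0, -1, 0, 0)
  | ['-','j'] => (0, 0, -1, 0)
  | ['-','k'] => (0, 0, 0, -1)
  | _ => (0, 0, 0, 0)

def pvStepA (s : List Char) (c : Char) : List Char :=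
  (opA.get? (s ++ [c])).getD []

-- the left fold of Hamilton products B's recursion is proved equal to
def pvF (cs : List Char) : Int × Int × Int × Int :=
  cs.foldl (fun a c => hprodB a (qgetB c)) (1, 0, 0, 0)

-- opA evaluated to its literal entry list once, so each lookup below is shallow.
set_option maxRecDepth 4000 in
theorem opA_eq : opA = PySem.Dict.mk
  [ (['1','1'],['1']), (['1','i'],['i']), (['1','j'],['j']), (['1','k'],['k'])
  , (['i','1'],['i']), (['i','i'],['-','1']), (['i','j'],['k']), (['i','k'],['-','j'])
  , (['j','1'],['j']), (['j','i'],['-','k']), (['j','j'],['-','1']), (['j','k'],['i'])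
  , (['k','1'],['k']), (['k','i'],['j']), (['k','j'],['-','i']), (['k','k'],['-','1'])
  , (['-','1','1'],['-','1']), (['-','1','i'],['-','i']), (['-','1','j'],['-','j']), (['-','1','k'],['-','k'])
  , (['-','i','1'],['-','i']), (['-','i','i'],['1']), (['-','i','j'],['-','k']), (['-','i','k'],['j'])
  , (['-','j','1'],['-','j']), (['-','j','i'],['k']), (['-','j','j'],['1']), (['-','j','k'],['-','i'])
  , (['-','k','1'],['-','k']), (['-','k','i'],['-','j']), (['-','k','j'],['i']), (['-','k','k'],['1'])
  , (['1','-','1'],['-','1']), (['1','-','i'],['-','i']), (['1','-','j'],['-','j']), (['1','-','k'],['-','k'])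
  , (['i','-','1'],['-','i']), (['i','-','i'],['1']), (['i','-','j'],['-','k']), (['i','-','k'],['j'])
  , (['j','-','1'],['-','j']), (['j','-','i'],['k']), (['j','-','j'],['1']), (['j','-','k'],['-','i'])
  , (['k','-','1'],['-','k']), (['k','-','i'],['-','j']), (['k','-','j'],['i']), (['k','-','k'],['1']) ] := by decide

-- One table step corresponds to one Hamilton-product step (32 concrete cases).
set_option maxRecDepth 4000 in
theorem pvStep_corr (s : List Char) (hs : s ∈ pvStates) (c : Char)
    (hc : c ∈ ['1', 'i', 'j', 'k']) :
    pvStepA s c ∈ pvStates ∧ pvPhi (pvStepA s c) = hprodB (pvPhi s) (qgetB c) := by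
  simp only [pvStates, List.mem_cons, List.not_mem_nil, or_false] at hs hc
  rcases hs with rfl|rfl|rfl|rfl|rfl|rfl|rfl|rfl <;> rcases hc with rfl|rfl|rfl|rfl <;>
    simp only [pvStepA, opA_eq] <;> exact ⟨by decide, by decide⟩

theorem pvFold_corr (l : List Char) (hl : ∀ c ∈ l, c ∈ ['1', 'i', 'j', 'k'])
    (s : List Char) (hs : s ∈ pvStates) :
    l.foldl pvStepA s ∈ pvStates ∧
      pvPhi (l.foldl pvStepA s) = l.foldl (fun a c => hprodB a (qgetB c)) (pvPhi s) := by
  induction l generalizing s with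
  | nil => exact ⟨hs, rfl⟩
  | cons c t ih =>
    have hc : c ∈ ['1', 'i', 'j', 'k'] := hl c (List.mem_cons_self ..)
    have ht : ∀ x ∈ t, x ∈ ['1', 'i', 'j', 'k'] := fun x hx => hl x (List.mem_cons_of_mem _ hx)
    have step := pvStep_corr s hs c hc
    have := ih ht (pvStepA s c) step.1
    simpa [step.2] using this

-- Among the eight states, exactly ['k'] has quaternion value (0,0,0,1).
theorem pvFinal (s : List Char) (hs : s ∈ pvStates) :
    (s == ['k']) = (pvPhi s == ((0 : Int), (0 : Int), (0 : Int), (1 : Int))) := by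
  fin_cases hs <;> decide

theorem hprodB_assoc (p q r : Int × Int × Int × Int) :
    hprodB (hprodB p q) r = hprodB p (hprodB q r) := by
  obtain ⟨a, b, c, d⟩ := p; obtain ⟨e, f, g, h⟩ := q; obtain ⟨x, y, z, w⟩ := r
  simp only [hprodB, Prod.mk.injEq]
  refine ⟨by ring, by ring, by ring, by ring⟩

theorem hprodB_one (q : Int × Int × Int × Int) : hprodB (1, 0, 0, 0) q = q := by
  obtain ⟨e, f, g, h⟩ := q
  simp only [hprodB, Prod.mk.injEq]
  refine ⟨by ring, by ring, by ring, by ring⟩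

theorem pvFold_push (l : List Char) (p q : Int × Int × Int × Int) :
    l.foldl (fun a c => hprodB a (qgetB c)) (hprodB p q) =
      hprodB p (l.foldl (fun a c => hprodB a (qgetB c)) q) := by
  induction l generalizing q with
  | nil => rfl
  | cons c t ih => simp only [List.foldl_cons, hprodB_assoc, ih]

theorem hprodB_one_right (q : Int × Int × Int × Int) : hprodB q (1, 0, 0, 0) = q := by
  obtain ⟨e, f, g, h⟩ := q
  simp only [hprodB, Prod.mk.injEq]
  refine ⟨by ring, by ring, by ring, by ring⟩

theorem pvF_append (l r : List Char) : pvF (l ++ r) = hprodB (pvF l) (pvF r) := by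
  unfold pvF
  rw [List.foldl_append, ← hprodB_one_right (l.foldl (fun a c => hprodB a (qgetB c)) (1, 0, 0, 0)),
    pvFold_push, hprodB_one_right]

-- B's divide-and-conquer product equals the left fold, for nonempty input.
theorem qprodB_eq_pvF_aux (n : Nat) : ∀ (cs : List Char), cs ≠ [] → cs.length ≤ n + 1 →
    qprodAux n cs = pvF cs := by
  induction n with
  | zero =>
    intro cs hne hlen
    match cs with
    | [] => exact absurd rfl hne
    | [c] => simp [qprodAux, pvF, hprodB_one]
    | _ :: _ :: _ => simp at hlen
  | succ n ih =>
    intro cs hne hlen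
    match cs with
    | [] => exact absurd rfl hne
    | [c] => simp [qprodAux, pvF, hprodB_one]
    | c1 :: c2 :: r =>
      show hprodB (qprodAux n ((c1 :: c2 :: r).take ((c1 :: c2 :: r).length / 2)))
            (qprodAux n ((c1 :: c2 :: r).drop ((c1 :: c2 :: r).length / 2)))
          = pvF (c1 :: c2 :: r)
      have hlen2 : 2 ≤ (c1 :: c2 :: r).length := by simp
      have ht : ((c1 :: c2 :: r).take ((c1 :: c2 :: r).length / 2)).length
          = (c1 :: c2 :: r).length / 2 := by
        rw [List.length_take]; omega
      have hd : ((c1 :: c2 :: r).drop ((c1 :: c2 :: r).length / 2)).length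
          = (c1 :: c2 :: r).length - (c1 :: c2 :: r).length / 2 := by
        rw [List.length_drop]
      rw [ih _ (by intro hh; rw [hh] at ht; simp at ht; omega) (by rw [ht]; omega),
        ih _ (by intro hh; rw [hh] at hd; simp at hd; omega) (by rw [hd]; omega),
        ← pvF_append, List.take_append_drop]

theorem qprodB_eq_pvF (cs : List Char) (h : cs ≠ []) : qprodB cs = pvF cs :=
  qprodB_eq_pvF_aux cs.length cs h (by omega)

-- ===== VERDICT (by name: the statement is the Claim_ definition above) =====
theorem buscar_k_spec : Claim_equal_buscar_k := by
  intro palabra _ hpre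
  unfold Spec_buscar_k buscar_k buscar_k_alt
  obtain ⟨hne, hval⟩ := hpre
  cases hcs : palabra.toList with
  | nil => exact absurd hcs hne
  | cons c0 t =>
    rcases hval with hlen | hall
    · -- length-1 case: t = []
      rw [hcs] at hlen
      have ht : t = [] := by
        cases t with
        | nil => rfl
        | cons a b => simp at hlen
      subst ht
      by_cases hk : c0 = 'k'
      · subst hk; simp
      · have h1 : (([c0] : List Char) == ['k']) = false := by
          simpa using hk
        simp [PySem.List.pyRange_one_eq_nil, h1]
    · -- all characters valid
      rw [hcs] at hall
      have hc0 : c0 ∈ ['1', 'i', 'j', 'k'] := hall c0 (List.mem_cons_self ..)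
      cases t with
      | nil =>
        fin_cases hc0 <;> decide
      | cons c1 t' =>
        have hg1 : (((c0 :: c1 :: t').length : Nat) == 1) = false := by simp
        have hget0 : PySem.List.pyGetD (c0 :: c1 :: t') 0 ' ' = c0 := by
          simp [PySem.List.pyGetD]
        have hfold :
            (PySem.List.pyRange 1 ((c0 :: c1 :: t').length : Int) 1).foldl
              (fun l1 y => (opA.get? (l1 ++ [PySem.List.pyGetD (c0 :: c1 :: t') y ' '])).getD []) [c0]
            = (c1 :: t').foldl pvStepA [c0] := by
          have := PySem.List.foldl_pyRange_pyGetD (xs := c0 :: c1 :: t') (a := 1) (d := ' ')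
            (f := fun l1 c => pvStepA l1 c) (init := [c0]) (by norm_num)
          simpa [pvStepA] using this
        have hs0 : ([c0] : List Char) ∈ pvStates := by
          fin_cases hc0 <;> decide
        have hq0 : pvPhi [c0] = qgetB c0 := by
          fin_cases hc0 <;> decide
        have ht : ∀ x ∈ c1 :: t', x ∈ ['1', 'i', 'j', 'k'] := fun x hx =>
          hall x (List.mem_cons_of_mem _ hx)
        have corr := pvFold_corr (c1 :: t') ht [c0] hs0
        have hfin := pvFinal _ corr.1
        have hq : qprodB (c0 :: c1 :: t') = pvPhi ((c1 :: t').foldl pvStepA [c0]) := by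
          rw [qprodB_eq_pvF _ (by simp), corr.2, hq0]
          unfold pvF
          rw [List.foldl_cons, hprodB_one]
        simp only [hg1, Bool.false_and, Bool.false_eq_true, if_false, hget0]
        rw [hfold, hq]
        cases hb : ((c1 :: t').foldl pvStepA [c0] == ['k']) with
        | true => rw [hb] at hfin; simpa using hfin
        | false => rw [hb] at hfin; simpa using hfin
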